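-- pv_equiv track=rewrite | github.com/pyapyapya/Problem-Solving-TIL | 프로그래머스/2/250136. ［PCCP 기출문제］ 2번 ／ 석유 시추/［PCCP 기출문제］ 2번 ／ 석유 시추.py | solution
-- ===== SOURCE A (Python) =====
-- def solution(land):
--     answer = 0
--     n = len(land)
--     m = len(land[0])
--     dx = (-1, 1, 0, 0)
--     dy = (0, 0, -1, 1)
--
--     check = [[0 for _ in range(m)] for _ in range(n)]
--
--     chunks = {}
--     num = 1
--     for i in range(n):
--         for j in range(m):
--             if land[i][j] == 0 or check[i][j] > 0:
--                 continue
--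
--             queue = [(i, j)]
--             size = 0
--             while queue:
--                 cur_x, cur_y = queue.pop(0)
--                 check[cur_x][cur_y] = num
--                 for x, y in zip(dx, dy):
--                     mv_x = cur_x + x
--                     mv_y = cur_y + y
--                     if not (0 <= mv_x < n and 0 <= mv_y < m):
--                         continue
--                     if land[mv_x][mv_y] == 0:
--                         continue
--                     if check[mv_x][mv_y] > 0:
--                         continue
--                     check[mv_x][mv_y] = num
--                     queue.append((mv_x, mv_y))
--                 size += 1
--             chunks[num] = size
--             num += 1
--     for j in range(m):
--         chunk_nums = set()
--         for i in range(n):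
--             if check[i][j]:
--                 chunk_nums.add(check[i][j])
--         sizes = sum([chunks[size] for size in chunk_nums])
--         answer = max(answer, sizes)
--     return answer
-- ===== SOURCE B (Python) =====
-- def solution(land):
--     n = len(land)
--     m = len(land[0])
--     best = 0
--     for j in range(m):
--         seen = [[False] * m for _ in range(n)]
--         stack = []
--         for i in range(n):
--             if land[i][j] != 0:
--                 seen[i][j] = True
--                 stack.append((i, j))
--         count = 0
--         while stack:
--             x, y = stack.pop()
--             count += 1
--             for nx, ny in ((x - 1, y), (x + 1, y), (x, y - 1), (x, y + 1)):
--                 if 0 <= nx < n and 0 <= ny < m and land[nx][ny] != 0 and not seen[nx][ny]: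
--                     seen[nx][ny] = True
--                     stack.append((nx, ny))
--         best = max(best, count)
--     return best
-- ===== Notes on version B (the rewrite author's own statement) =====
-- stated objective: simpler
-- what changed: B drops A's global BFS labeling pass with its check-grid, chunks dict and per-column label-set summation; instead, for each column it runs one multi-source stack flood fill seeded by that column's oil cells and counts the reached cells directly, keeping the running max.
import Mathlib
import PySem

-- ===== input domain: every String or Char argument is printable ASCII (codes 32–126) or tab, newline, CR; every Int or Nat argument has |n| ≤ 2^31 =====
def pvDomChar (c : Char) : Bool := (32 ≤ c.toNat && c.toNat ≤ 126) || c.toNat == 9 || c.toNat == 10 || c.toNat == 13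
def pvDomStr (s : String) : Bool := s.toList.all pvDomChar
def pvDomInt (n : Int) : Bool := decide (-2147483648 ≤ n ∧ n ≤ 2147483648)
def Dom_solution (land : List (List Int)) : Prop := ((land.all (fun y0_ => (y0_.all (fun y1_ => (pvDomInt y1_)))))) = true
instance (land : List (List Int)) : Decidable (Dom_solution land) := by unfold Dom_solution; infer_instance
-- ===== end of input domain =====

-- B replaces A's global BFS labeling (check grid + chunks dict + per-column label-set sums) by a
-- direct per-column multi-source flood fill that just counts reached cells: simpler, no labels.
-- 2D arrays are encoded as their lookup functions, in-place mutation as pointwise update (exact).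

-- ===== PORT A =====

/-- pointwise update of a function-encoded array (exact for Python in-place assignment) -/
def pvUpd {α β : Type} [DecidableEq α] (f : α → β) (a : α) (v : β) : α → β :=
  fun x => if x = a then v else f x

/-- `land[x][y]` for in-bounds indices (both programs only read in-bounds cells) -/
def pvCell (land : List (List Int)) (x y : Int) : Int :=
  (land.getD x.toNat []).getD y.toNat 0

/-- enough fuel for either worklist loop: every cell enters the worklist at most once -/
def pvFuel (land : List (List Int)) : Nat :=
  land.length * (land.headD []).length + 1

/-- A's BFS `while queue:` loop: pop from the FRONT, mark the popped cell, scan the four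
    neighbours in dx/dy order, marking and appending fresh oil cells; counts pops in `size`. -/
def pvBfsA (land : List (List Int)) (n m num : Int) :
    Nat → List (Int × Int) → ((Int × Int) → Int) → Int → (((Int × Int) → Int) × Int)
  | 0, _, check, size => (check, size)
  | _ + 1, [], check, size => (check, size)
  | fuel + 1, c :: queue, check, size =>
    let check1 := pvUpd check c num
    let st := [((-1 : Int), (0 : Int)), (1, 0), (0, -1), (0, 1)].foldl
      (fun (s : (((Int × Int) → Int) × List (Int × Int))) d =>
        let mv := (c.1 + d.1, c.2 + d.2)
        if 0 ≤ mv.1 ∧ mv.1 < n ∧ 0 ≤ mv.2 ∧ mv.2 < m then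
          if pvCell land mv.1 mv.2 = 0 then s
          else if s.1 mv > 0 then s
          else (pvUpd s.1 mv num, s.2 ++ [mv])
        else s)
      (check1, queue)
    pvBfsA land n m num fuel st.2 st.1 (size + 1)

/-- body of A's labeling double loop: state is (check, chunks-as-lookup, num) -/
def pvCellStepA (land : List (List Int)) (n m i : Int)
    (st : (((Int × Int) → Int) × (Int → Int) × Int)) (j : Int) :
    (((Int × Int) → Int) × (Int → Int) × Int) :=
  if pvCell land i j = 0 ∨ st.1 (i, j) > 0 then st
  else
    let r := pvBfsA land n m st.2.2 (pvFuel land) [(i, j)] st.1 0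
    (r.1, pvUpd st.2.1 st.2.2 r.2, st.2.2 + 1)

/-- A's labeling double loop -/
def pvScanA (land : List (List Int)) (n m : Int) :
    (((Int × Int) → Int) × (Int → Int) × Int) :=
  (PySem.List.pyRange 0 n 1).foldl
    (fun st i => (PySem.List.pyRange 0 m 1).foldl (pvCellStepA land n m i) st)
    ((fun _ => 0), (fun _ => 0), 1)

/-- A's per-column tally: the set of labels seen in column j, then the sum of their sizes -/
def pvColValA (land : List (List Int)) (n : Int)
    (st : (((Int × Int) → Int) × (Int → Int) × Int)) (j : Int) : Int :=
  let chunkNums : PySem.Set Int :=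
    (PySem.List.pyRange 0 n 1).foldl
      (fun s i => if st.1 (i, j) ≠ 0 then PySem.Set.add s (st.1 (i, j)) else s) []
  (chunkNums.map st.2.1).sum

def solution (land : List (List Int)) : Int :=
  let n : Int := land.length
  let m : Int := (land.headD []).length
  let st := pvScanA land n m
  (PySem.List.pyRange 0 m 1).foldl (fun answer j => max answer (pvColValA land n st j)) 0

-- ===== PORT B =====

/-- B's flood fill `while stack:` loop: pop from the BACK of the Python stack (= head here),
    count the pop, push unseen in-bounds oil neighbours, marking them as seen when pushed. -/
def pvFloodB (land : List (List Int)) (n m : Int) :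
    Nat → List (Int × Int) → ((Int × Int) → Bool) → Int → Int
  | 0, _, _, count => count
  | _ + 1, [], _, count => count
  | fuel + 1, c :: stack, seen, count =>
    let st := [(c.1 - 1, c.2), (c.1 + 1, c.2), (c.1, c.2 - 1), (c.1, c.2 + 1)].foldl
      (fun (s : (((Int × Int) → Bool) × List (Int × Int))) mv =>
        if 0 ≤ mv.1 ∧ mv.1 < n ∧ mv.2 ≥ 0 ∧ mv.2 < m ∧ pvCell land mv.1 mv.2 ≠ 0 ∧ ¬ s.1 mv = true then
          (pvUpd s.1 mv true, mv :: s.2)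
        else s)
      (seen, stack)
    pvFloodB land n m fuel st.2 st.1 (count + 1)

/-- B's per-column count: seed the stack with the column's oil cells (marked as seen), flood -/
def pvColValB (land : List (List Int)) (n m : Int) (j : Int) : Int :=
  let init :=
    (PySem.List.pyRange 0 n 1).foldl
      (fun (s : (((Int × Int) → Bool) × List (Int × Int))) i =>
        if pvCell land i j ≠ 0 then (pvUpd s.1 (i, j) true, (i, j) :: s.2) else s)
      ((fun _ => false), [])
  pvFloodB land n m (pvFuel land) init.2 init.1 0

def solution_alt (land : List (List Int)) : Int :=
  let n : Int := land.length
  let m : Int := (land.headD []).length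
  (PySem.List.pyRange 0 m 1).foldl (fun best j => max best (pvColValB land n m j)) 0

-- ===== PRECONDITION & SPEC =====
-- Pre_ excludes exactly the inputs where Python A raises IndexError: empty `land` (land[0])
-- and grids in which some later row is shorter than the first row (land[i][j] out of range).
def Pre_solution (land : List (List Int)) : Prop :=
  land ≠ [] ∧ ∀ row ∈ land, (land.headD []).length ≤ row.length

instance (land : List (List Int)) : Decidable (Pre_solution land) := by
  unfold Pre_solution; infer_instance

def pvWitness_solution : List (List Int) := [[1, 0, 1], [1, 1, 0]]

def Spec_solution (land : List (List Int)) (out : Int) : Prop := out = solution_alt land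
instance (land : List (List Int)) (out : Int) : Decidable (Spec_solution land out) := by
  unfold Spec_solution; infer_instance

-- ===== CLAIM (what is proved, stated in full; the proofs are below) =====
def Claim_equal_solution : Prop :=
  ∀ (land : List (List Int)), Dom_solution land → Pre_solution land → Spec_solution land (solution land)

-- ===== LEMMAS AND PROOFS =====

/-- the four grid neighbours of a cell -/
def pvNbrs (c : Int × Int) : List (Int × Int) :=
  [(c.1 - 1, c.2), (c.1 + 1, c.2), (c.1, c.2 - 1), (c.1, c.2 + 1)]

/-- an in-bounds nonzero ("oil") cell; bounds are those both programs use -/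
def pvOil (land : List (List Int)) (c : Int × Int) : Prop :=
  0 ≤ c.1 ∧ c.1 < (land.length : Int) ∧ 0 ≤ c.2 ∧ c.2 < ((land.headD []).length : Int) ∧
    pvCell land c.1 c.2 ≠ 0

/-- grid adjacency between oil cells -/
def pvAdj (land : List (List Int)) (c d : Int × Int) : Prop :=
  pvOil land c ∧ pvOil land d ∧ d ∈ pvNbrs c

/-- connectivity: reflexive-transitive closure of adjacency -/
def pvConn (land : List (List Int)) (c d : Int × Int) : Prop :=
  Relation.ReflTransGen (pvAdj land) c d

/-- all in-bounds cells, as a Finset (proof layer only) -/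
noncomputable def pvGrid (land : List (List Int)) : Finset (Int × Int) :=
  Finset.Icc 0 ((land.length : Int) - 1) ×ˢ Finset.Icc 0 (((land.headD []).length : Int) - 1)

/-- reachability from the oil cells of column j -/
def pvReach (land : List (List Int)) (j : Int) (c : Int × Int) : Prop :=
  ∃ i : Int, pvOil land (i, j) ∧ pvConn land (i, j) c

theorem pvAdj_symm (land : List (List Int)) {c d : Int × Int} (h : pvAdj land c d) :
    pvAdj land d c := by
  obtain ⟨hc, hd, hm⟩ := h
  refine ⟨hd, hc, ?_⟩
  obtain ⟨x, y⟩ := c; obtain ⟨u, v⟩ := d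
  simp only [pvNbrs, List.mem_cons, List.not_mem_nil, or_false, Prod.mk.injEq] at hm ⊢
  omega

theorem pvConn_symm (land : List (List Int)) {c d : Int × Int} (h : pvConn land c d) :
    pvConn land d c :=
  Relation.ReflTransGen.symmetric (fun _ _ hx => pvAdj_symm land hx) h

theorem pvConn_oil (land : List (List Int)) {c d : Int × Int}
    (h : pvConn land c d) (hc : pvOil land c) : pvOil land d := by
  induction h with
  | refl => exact hc
  | tail _ hadj _ => exact hadj.2.1

theorem pvOil_mem_grid (land : List (List Int)) {c : Int × Int} (h : pvOil land c) :
    c ∈ pvGrid land := by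
  obtain ⟨h1, h2, h3, h4, _⟩ := h
  simp only [pvGrid, Finset.mem_product, Finset.mem_Icc]
  omega

theorem pvGrid_card (land : List (List Int)) :
    (pvGrid land).card = land.length * (land.headD []).length := by
  simp only [pvGrid, Finset.card_product, Int.card_Icc]
  have h1 : ((land.length : Int) - 1 + 1 - 0).toNat = land.length := by omega
  have h2 : ((((land.headD []).length : Int)) - 1 + 1 - 0).toNat = (land.headD []).length := by
    omega
  rw [h1, h2]


/-- the neighbour-scan body of A's BFS, named for the proofs -/
def pvStepFnA (land : List (List Int)) (n m num : Int) (c : Int × Int)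
    (s : (((Int × Int) → Int) × List (Int × Int))) (d : Int × Int) :
    (((Int × Int) → Int) × List (Int × Int)) :=
  let mv := (c.1 + d.1, c.2 + d.2)
  if 0 ≤ mv.1 ∧ mv.1 < n ∧ 0 ≤ mv.2 ∧ mv.2 < m then
    if pvCell land mv.1 mv.2 = 0 then s
    else if s.1 mv > 0 then s
    else (pvUpd s.1 mv num, s.2 ++ [mv])
  else s

theorem pvBfsA_cons (land : List (List Int)) (n m num : Int) (fuel : Nat)
    (c : Int × Int) (queue : List (Int × Int)) (check : (Int × Int) → Int) (size : Int) :
    pvBfsA land n m num (fuel + 1) (c :: queue) check size =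
      pvBfsA land n m num fuel
        ([((-1 : Int), (0 : Int)), (1, 0), (0, -1), (0, 1)].foldl (pvStepFnA land n m num c)
          (pvUpd check c num, queue)).2
        ([((-1 : Int), (0 : Int)), (1, 0), (0, -1), (0, 1)].foldl (pvStepFnA land n m num c)
          (pvUpd check c num, queue)).1
        (size + 1) := rfl

theorem pvFoldA (land : List (List Int)) (num : Int) (c : Int × Int)
    (hnum : 0 < num) (hc : pvOil land c) :
    ∀ (L : List (Int × Int)) (chk : (Int × Int) → Int) (q : List (Int × Int)),
      (∀ d ∈ L, (c.1 + d.1, c.2 + d.2) ∈ pvNbrs c) →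
      (∀ x, 0 ≤ chk x) →
      ∃ fr : List (Int × Int),
        (L.foldl (pvStepFnA land (land.length : Int) ((land.headD []).length : Int) num c)
            (chk, q)).2 = q ++ fr ∧
        fr.Nodup ∧
        (∀ x ∈ fr, pvAdj land c x ∧ chk x = 0) ∧
        (∀ x, (L.foldl (pvStepFnA land (land.length : Int) ((land.headD []).length : Int) num c)
            (chk, q)).1 x = if x ∈ fr then num else chk x) ∧
        (∀ d ∈ L, pvOil land (c.1 + d.1, c.2 + d.2) →
          0 < (L.foldl (pvStepFnA land (land.length : Int) ((land.headD []).length : Int) num c)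
            (chk, q)).1 (c.1 + d.1, c.2 + d.2)) := by
  intro L
  induction L with
  | nil =>
    intro chk q _ _
    exact ⟨[], by simp, List.nodup_nil, by simp, by simp, by simp⟩
  | cons e L ih =>
    intro chk q hL hnn
    have hLae : ∀ d ∈ L, (c.1 + d.1, c.2 + d.2) ∈ pvNbrs c := fun d hd => hL d (List.mem_cons_of_mem _ hd)
    have he : (c.1 + e.1, c.2 + e.2) ∈ pvNbrs c := hL e List.mem_cons_self
    set mv : Int × Int := (c.1 + e.1, c.2 + e.2) with hmv
    simp only [List.foldl_cons]
    by_cases hb : 0 ≤ mv.1 ∧ mv.1 < (land.length : Int) ∧ 0 ≤ mv.2 ∧ mv.2 < ((land.headD []).length : Int)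
    · by_cases hz : pvCell land mv.1 mv.2 = 0
      · -- not oil: skip
        have hstep : pvStepFnA land (land.length : Int) ((land.headD []).length : Int) num c (chk, q) e = (chk, q) := by
          simp only [pvStepFnA]; rw [if_pos hb, if_pos hz]
        rw [hstep]
        obtain ⟨fr, h1, h2, h3, h4, h5⟩ := ih chk q hLae hnn
        refine ⟨fr, h1, h2, h3, h4, ?_⟩
        intro d hd hoil
        rcases List.mem_cons.mp hd with rfl | hd'
        · exact absurd hoil.2.2.2.2 (by simpa using hz)
        · exact h5 d hd' hoil
      · have hmoil : pvOil land mv := ⟨hb.1, hb.2.1, hb.2.2.1, hb.2.2.2, hz⟩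
        by_cases hp : chk mv > 0
        · -- already marked: skip
          have hstep : pvStepFnA land (land.length : Int) ((land.headD []).length : Int) num c (chk, q) e = (chk, q) := by
            simp only [pvStepFnA]; rw [if_pos hb, if_neg hz, if_pos hp]
          rw [hstep]
          obtain ⟨fr, h1, h2, h3, h4, h5⟩ := ih chk q hLae hnn
          refine ⟨fr, h1, h2, h3, h4, ?_⟩
          intro d hd _
          rcases List.mem_cons.mp hd with rfl | hd'
          · rw [h4]
            split
            · exact hnum
            · exact hp
          · exact h5 d hd' (by assumption)
        · -- fresh: mark and enqueue
          have hz0 : chk mv = 0 := le_antisymm (by omega) (hnn mv)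
          have hstep : pvStepFnA land (land.length : Int) ((land.headD []).length : Int) num c (chk, q) e = (pvUpd chk mv num, q ++ [mv]) := by
            simp only [pvStepFnA]; rw [if_pos hb, if_neg hz, if_neg hp]
          rw [hstep]
          have hnn' : ∀ x, 0 ≤ pvUpd chk mv num x := by
            intro x; simp only [pvUpd]; split
            · omega
            · exact hnn x
          obtain ⟨fr, h1, h2, h3, h4, h5⟩ := ih (pvUpd chk mv num) (q ++ [mv]) hLae hnn'
          have hmvfr : mv ∉ fr := by
            intro hmem
            have := (h3 mv hmem).2
            simp [pvUpd] at this
            omega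
          refine ⟨mv :: fr, ?_, ?_, ?_, ?_, ?_⟩
          · rw [h1, List.append_assoc]; rfl
          · exact List.Nodup.cons hmvfr h2
          · intro x hx
            rcases List.mem_cons.mp hx with rfl | hx'
            · exact ⟨⟨hc, hmoil, he⟩, hz0⟩
            · obtain ⟨ha, hv⟩ := h3 x hx'
              refine ⟨ha, ?_⟩
              simp only [pvUpd] at hv
              by_cases hxmv : x = mv
              · subst hxmv; exact hz0
              · rwa [if_neg hxmv] at hv
          · intro x
            rw [h4 x]
            by_cases hxfr : x ∈ fr
            · rw [if_pos hxfr, if_pos (List.mem_cons_of_mem _ hxfr)]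
            · rw [if_neg hxfr]
              simp only [pvUpd]
              by_cases hxmv : x = mv
              · subst hxmv; rw [if_pos rfl, if_pos List.mem_cons_self]
              · rw [if_neg hxmv, if_neg (by simp [hxmv, hxfr])]
          · intro d hd _
            rcases List.mem_cons.mp hd with rfl | hd'
            · rw [h4]
              split
              · exact hnum
              · simp only [pvUpd, ← hmv]; exact hnum
            · exact h5 d hd' (by assumption)
    · -- out of bounds: skip
      have hstep : pvStepFnA land (land.length : Int) ((land.headD []).length : Int) num c (chk, q) e = (chk, q) := by
        simp only [pvStepFnA]; rw [if_neg hb]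
      rw [hstep]
      obtain ⟨fr, h1, h2, h3, h4, h5⟩ := ih chk q hLae hnn
      refine ⟨fr, h1, h2, h3, h4, ?_⟩
      intro d hd hoil
      rcases List.mem_cons.mp hd with rfl | hd'
      · exact absurd ⟨hoil.1, hoil.2.1, hoil.2.2.1, hoil.2.2.2.1⟩ hb
      · exact h5 d hd' hoil


theorem pvNbrs_cases {c d : Int × Int} (h : d ∈ pvNbrs c) :
    ∃ off ∈ ([((-1 : Int), (0 : Int)), (1, 0), (0, -1), (0, 1)] : List (Int × Int)),
      d = (c.1 + off.1, c.2 + off.2) := by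
  obtain ⟨x, y⟩ := c; obtain ⟨u, v⟩ := d
  simp only [pvNbrs, List.mem_cons, List.not_mem_nil, or_false, Prod.mk.injEq] at h
  rcases h with ⟨h1, h2⟩ | ⟨h1, h2⟩ | ⟨h1, h2⟩ | ⟨h1, h2⟩
  · refine ⟨(-1, 0), by norm_num, ?_⟩; simp only [Prod.mk.injEq]; omega
  · refine ⟨(1, 0), by norm_num, ?_⟩; simp only [Prod.mk.injEq]; omega
  · refine ⟨(0, -1), by norm_num, ?_⟩; simp only [Prod.mk.injEq]; omega
  · refine ⟨(0, 1), by norm_num, ?_⟩; simp only [Prod.mk.injEq]; omega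

/-- loop invariant of A's BFS (after its first pop, which marks the start cell) -/
structure PvBfsInv (land : List (List Int)) (num : Int) (s : Int × Int)
    (queue : List (Int × Int)) (check : (Int × Int) → Int) (size : Int) : Prop where
  hnum : 0 < num
  hs : pvOil land s
  smark : check s = num
  qmark : ∀ c ∈ queue, check c = num
  marks : ∀ c, check c = num → pvOil land c ∧ pvConn land s c
  nonneg : ∀ c, 0 ≤ check c
  explored : ∀ c, check c = num → c ∉ queue → ∀ d, pvAdj land c d → 0 < check d
  compfresh : ∀ c, pvConn land s c → check c = 0 ∨ check c = num
  nodup : queue.Nodup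
  size_eq : size = (((pvGrid land).filter (fun c => check c = num)).card : Int) - queue.length

theorem pvBfsA_core (land : List (List Int)) (num : Int) (s : Int × Int) :
    ∀ (fuel : Nat) (queue : List (Int × Int)) (check : (Int × Int) → Int) (size : Int),
      PvBfsInv land num s queue check size →
      queue.length + ((pvGrid land).filter (fun c => check c = 0)).card < fuel →
      (∀ c, (pvBfsA land (land.length : Int) ((land.headD []).length : Int) num fuel queue
          check size).1 c = num ↔ pvConn land s c) ∧
      (∀ c, ¬ pvConn land s c → (pvBfsA land (land.length : Int) ((land.headD []).length : Int)
          num fuel queue check size).1 c = check c) ∧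
      ((pvBfsA land (land.length : Int) ((land.headD []).length : Int) num fuel queue
          check size).2 =
        (((pvGrid land).filter (fun c => (pvBfsA land (land.length : Int)
          ((land.headD []).length : Int) num fuel queue check size).1 c = num)).card : Int)) := by
  intro fuel
  induction fuel with
  | zero => intro queue check size _ hf; exact absurd hf (Nat.not_lt_zero _)
  | succ fuel ih =>
    intro queue check size hinv hf
    match queue with
    | [] =>
      have hres : pvBfsA land (land.length : Int) ((land.headD []).length : Int) num
          (fuel + 1) [] check size = (check, size) := rfl
      simp only [hres]
      refine ⟨?_, fun c _ => trivial, ?_⟩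
      · intro c
        constructor
        · intro h; exact (hinv.marks c h).2
        · intro h
          induction h with
          | refl => exact hinv.smark
          | tail hp hadj ihh =>
            have h1 := hinv.explored _ ihh (List.not_mem_nil) _ hadj
            rcases hinv.compfresh _ (Relation.ReflTransGen.tail hp hadj) with h2 | h2
            · omega
            · exact h2
      · have := hinv.size_eq
        simp only [List.length_nil] at this
        omega
    | c :: queue' =>
      have hcheckc : check c = num := hinv.qmark c List.mem_cons_self
      have hupd : pvUpd check c num = check := by
        funext x; simp only [pvUpd]
        split
        · rename_i hx; rw [hx, hcheckc]
        · rfl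
      rw [pvBfsA_cons, hupd]
      have hcoil : pvOil land c := (hinv.marks c hcheckc).1
      have hconnc : pvConn land s c := (hinv.marks c hcheckc).2
      have hL : ∀ d ∈ ([((-1 : Int), (0 : Int)), (1, 0), (0, -1), (0, 1)] : List (Int × Int)),
          (c.1 + d.1, c.2 + d.2) ∈ pvNbrs c := by
        intro d hd
        fin_cases hd <;> simp [pvNbrs, Prod.ext_iff] <;> omega
      obtain ⟨fr, hq, hfrnd, hfr, hpt, hcov⟩ :=
        pvFoldA land num c hinv.hnum hcoil _ check queue' hL hinv.nonneg
      set F := ([((-1 : Int), (0 : Int)), (1, 0), (0, -1), (0, 1)] : List (Int × Int)).foldl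
        (pvStepFnA land (land.length : Int) ((land.headD []).length : Int) num c)
        (check, queue') with hF
      -- facts about fr
      have hfr_oil : ∀ x ∈ fr, pvOil land x := fun x hx => ((hfr x hx).1).2.1
      have hfr_zero : ∀ x ∈ fr, check x = 0 := fun x hx => (hfr x hx).2
      have hfr_conn : ∀ x ∈ fr, pvConn land s x := fun x hx =>
        Relation.ReflTransGen.tail hconnc (hfr x hx).1
      have hmono : ∀ y, 0 < check y → 0 < F.1 y := by
        intro y hy; rw [hpt y]; split
        · exact hinv.hnum
        · exact hy
      have hptnum : ∀ x, F.1 x = num ↔ (x ∈ fr ∨ check x = num) := by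
        intro x; rw [hpt x]
        split
        · rename_i h; simp [h]
        · rename_i h; simp [h]
      -- cardinality bookkeeping
      have hsub_grid : fr.toFinset ⊆ pvGrid land := by
        intro x hx; exact pvOil_mem_grid land (hfr_oil x (List.mem_toFinset.mp hx))
      have hA2 : (pvGrid land).filter (fun x => F.1 x = num) =
          (pvGrid land).filter (fun x => check x = num) ∪ fr.toFinset := by
        ext x
        simp only [Finset.mem_filter, Finset.mem_union, List.mem_toFinset]
        constructor
        · rintro ⟨hg, hx⟩
          rcases (hptnum x).mp hx with h | h
          · exact Or.inr h
          · exact Or.inl ⟨hg, h⟩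
        · rintro (⟨hg, hx⟩ | hx)
          · exact ⟨hg, (hptnum x).mpr (Or.inr hx)⟩
          · exact ⟨hsub_grid (List.mem_toFinset.mpr hx), (hptnum x).mpr (Or.inl hx)⟩
      have hdisjA : Disjoint ((pvGrid land).filter (fun x => check x = num)) fr.toFinset := by
        rw [Finset.disjoint_right]
        intro x hx hx'
        have := hfr_zero x (List.mem_toFinset.mp hx)
        have := (Finset.mem_filter.mp hx').2
        have := hinv.hnum
        omega
      have hcardA : ((pvGrid land).filter (fun x => F.1 x = num)).card =
          ((pvGrid land).filter (fun x => check x = num)).card + fr.length := by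
        rw [hA2, Finset.card_union_of_disjoint hdisjA, List.toFinset_card_of_nodup hfrnd]
      have hZ2 : (pvGrid land).filter (fun x => F.1 x = 0) =
          ((pvGrid land).filter (fun x => check x = 0)) \ fr.toFinset := by
        ext x
        simp only [Finset.mem_filter, Finset.mem_sdiff, List.mem_toFinset]
        constructor
        · rintro ⟨hg, hx⟩
          rw [hpt x] at hx
          by_cases hxfr : x ∈ fr
          · rw [if_pos hxfr] at hx; exact absurd hx (by have := hinv.hnum; omega)
          · rw [if_neg hxfr] at hx; exact ⟨⟨hg, hx⟩, hxfr⟩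
        · rintro ⟨⟨hg, hx⟩, hxfr⟩
          refine ⟨hg, ?_⟩
          rw [hpt x, if_neg hxfr]; exact hx
      have hsubZ : fr.toFinset ⊆ (pvGrid land).filter (fun x => check x = 0) := by
        intro x hx
        exact Finset.mem_filter.mpr ⟨hsub_grid hx, hfr_zero x (List.mem_toFinset.mp hx)⟩
      have hcardZ : ((pvGrid land).filter (fun x => F.1 x = 0)).card =
          ((pvGrid land).filter (fun x => check x = 0)).card - fr.length ∧
          fr.length ≤ ((pvGrid land).filter (fun x => check x = 0)).card := by
        constructor
        · rw [hZ2, Finset.card_sdiff, Finset.inter_eq_left.mpr hsubZ,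
            List.toFinset_card_of_nodup hfrnd]
        · calc fr.length = fr.toFinset.card := (List.toFinset_card_of_nodup hfrnd).symm
            _ ≤ _ := Finset.card_le_card hsubZ
      -- the new invariant
      have hinv' : PvBfsInv land num s (queue' ++ fr) F.1 (size + 1) := by
        refine ⟨hinv.hnum, hinv.hs, ?_, ?_, ?_, ?_, ?_, ?_, ?_, ?_⟩
        · rw [hpt s, if_neg (fun hs' => by have := hfr_zero s hs'; have := hinv.smark; have := hinv.hnum; omega)]
          exact hinv.smark
        · intro x hx
          rcases List.mem_append.mp hx with hx' | hx'
          · exact (hptnum x).mpr (Or.inr (hinv.qmark x (List.mem_cons_of_mem _ hx')))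
          · exact (hptnum x).mpr (Or.inl hx')
        · intro x hx
          rcases (hptnum x).mp hx with h | h
          · exact ⟨hfr_oil x h, hfr_conn x h⟩
          · exact hinv.marks x h
        · intro x; rw [hpt x]; split
          · exact le_of_lt hinv.hnum
          · exact hinv.nonneg x
        · intro x hxnum hxq d hadj
          by_cases hxc : x = c
          · subst hxc
            obtain ⟨off, hoffmem, hdoff⟩ := pvNbrs_cases hadj.2.2
            rw [hdoff]
            exact hcov off hoffmem (by rw [← hdoff]; exact hadj.2.1)
          · have hxfr : x ∉ fr := fun h => hxq (List.mem_append.mpr (Or.inr h))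
            have hxold : check x = num := by
              rw [hpt x, if_neg hxfr] at hxnum; exact hxnum
            have hxq' : x ∉ c :: queue' := by
              intro h
              rcases List.mem_cons.mp h with h' | h'
              · exact hxc h'
              · exact hxq (List.mem_append.mpr (Or.inl h'))
            exact hmono d (hinv.explored x hxold hxq' d hadj)
        · intro x hconn
          rcases hinv.compfresh x hconn with h | h
          · by_cases hxfr : x ∈ fr
            · exact Or.inr ((hptnum x).mpr (Or.inl hxfr))
            · rw [hpt x, if_neg hxfr]; exact Or.inl h
          · exact Or.inr ((hptnum x).mpr (Or.inr h))
        · refine List.Nodup.append ((List.nodup_cons.mp hinv.nodup).2) hfrnd ?_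
          intro x hx1 hx2
          have := hinv.qmark x (List.mem_cons_of_mem _ hx1)
          have := hfr_zero x hx2
          have := hinv.hnum
          omega
        · have h0 := hinv.size_eq
          simp only [List.length_cons, List.length_append] at h0 ⊢
          rw [hcardA]
          push_cast
          push_cast at h0
          omega
      obtain ⟨hcz1, hcz2⟩ := hcardZ
      have hf' : (queue' ++ fr).length +
          ((pvGrid land).filter (fun x => F.1 x = 0)).card < fuel := by
        simp only [List.length_cons] at hf
        simp only [List.length_append]
        omega
      obtain ⟨C1, C2, C3⟩ := ih (queue' ++ fr) F.1 (size + 1) hinv' hf'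
      rw [hq]
      refine ⟨C1, ?_, C3⟩
      intro x hx
      rw [C2 x hx, hpt x, if_neg (fun h => hx (hfr_conn x h))]

theorem pvBfsA_run (land : List (List Int)) (num : Int) (s : Int × Int)
    (check : (Int × Int) → Int)
    (hnum : 0 < num) (hs : pvOil land s) (h0 : check s = 0)
    (hnonneg : ∀ c, 0 ≤ check c) (hlt : ∀ c, check c < num)
    (hcons : ∀ c d, 0 < check c → pvConn land c d → check d = check c) :
    (∀ c, (pvBfsA land (land.length : Int) ((land.headD []).length : Int) num (pvFuel land)
        [s] check 0).1 c = num ↔ pvConn land s c) ∧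
    (∀ c, ¬ pvConn land s c → (pvBfsA land (land.length : Int) ((land.headD []).length : Int)
        num (pvFuel land) [s] check 0).1 c = check c) ∧
    ((pvBfsA land (land.length : Int) ((land.headD []).length : Int) num (pvFuel land)
        [s] check 0).2 =
      (((pvGrid land).filter (fun c => (pvBfsA land (land.length : Int)
        ((land.headD []).length : Int) num (pvFuel land) [s] check 0).1 c = num)).card : Int)) := by
  have hfuel : pvFuel land = (land.length * (land.headD []).length) + 1 := rfl
  rw [hfuel, pvBfsA_cons]
  have hL : ∀ d ∈ ([((-1 : Int), (0 : Int)), (1, 0), (0, -1), (0, 1)] : List (Int × Int)),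
      (s.1 + d.1, s.2 + d.2) ∈ pvNbrs s := by
    intro d hd
    fin_cases hd <;> simp [pvNbrs, Prod.ext_iff] <;> omega
  have hnn1 : ∀ x, 0 ≤ pvUpd check s num x := by
    intro x; simp only [pvUpd]; split
    · exact le_of_lt hnum
    · exact hnonneg x
  obtain ⟨fr, hq, hfrnd, hfr, hpt, hcov⟩ :=
    pvFoldA land num s hnum hs _ (pvUpd check s num) [] hL hnn1
  set F := ([((-1 : Int), (0 : Int)), (1, 0), (0, -1), (0, 1)] : List (Int × Int)).foldl
    (pvStepFnA land (land.length : Int) ((land.headD []).length : Int) num s)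
    (pvUpd check s num, []) with hF
  rw [List.nil_append] at hq
  have hchk1 : ∀ x, pvUpd check s num x = if x = s then num else check x := fun x => rfl
  have hchk1num : ∀ x, pvUpd check s num x = num ↔ x = s := by
    intro x; rw [hchk1]
    split
    · rename_i h; simp [h]
    · rename_i h; simp [h]
      intro h'; exact absurd h' (by have := hlt x; omega)
  have hcomp0 : ∀ x, pvConn land s x → check x = 0 := by
    intro x hconn
    by_contra h
    have hpos : 0 < check x := lt_of_le_of_ne (hnonneg x) (Ne.symm h)
    have := hcons x s hpos (pvConn_symm land hconn)
    omega
  have hfr_oil : ∀ x ∈ fr, pvOil land x := fun x hx => ((hfr x hx).1).2.1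
  have hfr_zero1 : ∀ x ∈ fr, pvUpd check s num x = 0 := fun x hx => (hfr x hx).2
  have hfr_ne_s : ∀ x ∈ fr, x ≠ s := by
    intro x hx h
    have := hfr_zero1 x hx
    rw [h, hchk1, if_pos rfl] at this
    omega
  have hfr_conn : ∀ x ∈ fr, pvConn land s x := fun x hx =>
    Relation.ReflTransGen.tail Relation.ReflTransGen.refl (hfr x hx).1
  have hsfr : s ∉ fr := fun h => hfr_ne_s s h rfl
  have hptnum : ∀ x, F.1 x = num ↔ (x ∈ fr ∨ x = s) := by
    intro x; rw [hpt x]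
    split
    · rename_i h; simp [h]
    · rename_i h; rw [hchk1num]; simp [h]
  -- cardinalities
  have hsgrid : s ∈ pvGrid land := pvOil_mem_grid land hs
  have hfrg : fr.toFinset ⊆ pvGrid land := by
    intro x hx; exact pvOil_mem_grid land (hfr_oil x (List.mem_toFinset.mp hx))
  have hfilnum : (pvGrid land).filter (fun x => F.1 x = num) = insert s fr.toFinset := by
    ext x
    simp only [Finset.mem_filter, Finset.mem_insert, List.mem_toFinset]
    constructor
    · rintro ⟨hg, hx⟩
      rcases (hptnum x).mp hx with h | h
      · exact Or.inr h
      · exact Or.inl h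
    · rintro (h | h)
      · subst h; exact ⟨hsgrid, (hptnum x).mpr (Or.inr rfl)⟩
      · exact ⟨hfrg (List.mem_toFinset.mpr h), (hptnum x).mpr (Or.inl h)⟩
  have hcardnum : ((pvGrid land).filter (fun x => F.1 x = num)).card = fr.length + 1 := by
    rw [hfilnum, Finset.card_insert_of_notMem (fun h => hsfr (List.mem_toFinset.mp h)),
      List.toFinset_card_of_nodup hfrnd]
  have hinv' : PvBfsInv land num s fr F.1 (0 + 1) := by
    refine ⟨hnum, hs, ?_, ?_, ?_, ?_, ?_, ?_, hfrnd, ?_⟩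
    · rw [hpt s, if_neg hsfr, hchk1, if_pos rfl]
    · intro x hx; exact (hptnum x).mpr (Or.inl hx)
    · intro x hx
      rcases (hptnum x).mp hx with h | h
      · exact ⟨hfr_oil x h, hfr_conn x h⟩
      · subst h; exact ⟨hs, Relation.ReflTransGen.refl⟩
    · intro x; rw [hpt x]; split
      · exact le_of_lt hnum
      · exact hnn1 x
    · intro x hxnum hxfr d hadj
      rcases (hptnum x).mp hxnum with h | h
      · exact absurd h hxfr
      · subst h
        obtain ⟨off, hoffmem, hdoff⟩ := pvNbrs_cases hadj.2.2
        rw [hdoff]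
        exact hcov off hoffmem (by rw [← hdoff]; exact hadj.2.1)
    · intro x hconn
      by_cases hxfr : x ∈ fr
      · exact Or.inr ((hptnum x).mpr (Or.inl hxfr))
      · by_cases hxs : x = s
        · exact Or.inr ((hptnum x).mpr (Or.inr hxs))
        · rw [hpt x, if_neg hxfr, hchk1, if_neg hxs]
          exact Or.inl (hcomp0 x hconn)
    · rw [hcardnum]
      simp only [Nat.cast_add, Nat.cast_one]
      omega
  have hfuelK : fr.length + ((pvGrid land).filter (fun x => F.1 x = 0)).card <
      land.length * (land.headD []).length := by
    have hZg : (pvGrid land).filter (fun x => F.1 x = 0) ⊆ pvGrid land := Finset.filter_subset _ _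
    have hdisj : Disjoint (insert s fr.toFinset) ((pvGrid land).filter (fun x => F.1 x = 0)) := by
      rw [Finset.disjoint_right]
      intro x hx hx'
      have h1 : F.1 x = num := (hptnum x).mpr (by
        rcases Finset.mem_insert.mp hx' with h | h
        · exact Or.inr h
        · exact Or.inl (List.mem_toFinset.mp h))
      have h2 : F.1 x = 0 := (Finset.mem_filter.mp hx).2
      omega
    have hsub : insert s fr.toFinset ∪ (pvGrid land).filter (fun x => F.1 x = 0) ⊆
        pvGrid land := by
      intro x hx
      rcases Finset.mem_union.mp hx with h | h
      · rw [← hfilnum] at h; exact (Finset.mem_filter.mp h).1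
      · exact hZg h
    have h1 := Finset.card_le_card hsub
    rw [Finset.card_union_of_disjoint hdisj] at h1
    have h2 : (insert s fr.toFinset).card = fr.length + 1 := by rw [← hfilnum]; exact hcardnum
    rw [h2, pvGrid_card] at h1
    omega
  rw [hq]
  obtain ⟨C1, C2, C3⟩ := pvBfsA_core land num s
    (land.length * (land.headD []).length) fr F.1 (0 + 1) hinv' hfuelK
  refine ⟨C1, ?_, C3⟩
  intro x hx
  rw [C2 x hx, hpt x, if_neg (fun h => hx (hfr_conn x h)), hchk1,
    if_neg (fun h => hx (by rw [h]; exact Relation.ReflTransGen.refl))]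

/-- invariant of A's labeling scan: `proc` = the cells already visited by the double loop -/
structure PvScanInv (land : List (List Int)) (proc : Int × Int → Prop)
    (check : (Int × Int) → Int) (chunks : Int → Int) (num : Int) : Prop where
  one_le : 1 ≤ num
  nonneg : ∀ c, 0 ≤ check c
  lt : ∀ c, check c < num
  oil : ∀ c, 0 < check c → pvOil land c
  cons : ∀ c d, 0 < check c → pvConn land c d → check d = check c
  inj : ∀ c d, 0 < check c → 0 < check d → check c = check d → pvConn land c d
  cover : ∀ c, proc c → pvOil land c → 0 < check c
  sizes : ∀ k, 0 < k → k < num →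
    chunks k = (((pvGrid land).filter (fun c => check c = k)).card : Int)

theorem pvScanInv_mono (land : List (List Int)) {proc proc' : Int × Int → Prop}
    {check : (Int × Int) → Int} {chunks : Int → Int} {num : Int}
    (h : ∀ c, proc' c → proc c) (hinv : PvScanInv land proc check chunks num) :
    PvScanInv land proc' check chunks num :=
  ⟨hinv.one_le, hinv.nonneg, hinv.lt, hinv.oil, hinv.cons, hinv.inj,
    fun c hc => hinv.cover c (h c hc), hinv.sizes⟩

theorem pvStepA_inv (land : List (List Int)) (proc : Int × Int → Prop)
    (st : (((Int × Int) → Int) × (Int → Int) × Int)) (i j : Int)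
    (hij : 0 ≤ i ∧ i < (land.length : Int) ∧ 0 ≤ j ∧ j < ((land.headD []).length : Int))
    (hinv : PvScanInv land proc st.1 st.2.1 st.2.2) :
    PvScanInv land (fun c => proc c ∨ c = (i, j))
      (pvCellStepA land (land.length : Int) ((land.headD []).length : Int) i st j).1
      (pvCellStepA land (land.length : Int) ((land.headD []).length : Int) i st j).2.1
      (pvCellStepA land (land.length : Int) ((land.headD []).length : Int) i st j).2.2 := by
  by_cases hskip : pvCell land i j = 0 ∨ st.1 (i, j) > 0
  · rw [pvCellStepA, if_pos hskip]
    refine ⟨hinv.one_le, hinv.nonneg, hinv.lt, hinv.oil, hinv.cons, hinv.inj, ?_, hinv.sizes⟩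
    intro c hc hoil
    rcases hc with hc | hc
    · exact hinv.cover c hc hoil
    · subst hc
      rcases hskip with h | h
      · exact absurd h hoil.2.2.2.2
      · exact h
  · rw [pvCellStepA, if_neg hskip]
    rw [not_or] at hskip
    obtain ⟨hcell, hle⟩ := hskip
    have hz : st.1 (i, j) = 0 := le_antisymm (not_lt.mp hle) (hinv.nonneg _)
    have hs : pvOil land (i, j) := ⟨hij.1, hij.2.1, hij.2.2.1, hij.2.2.2, hcell⟩
    have hnum : 0 < st.2.2 := hinv.one_le
    obtain ⟨C1, C2, C3⟩ := pvBfsA_run land st.2.2 (i, j) st.1 hnum hs hz hinv.nonneg hinv.lt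
      hinv.cons
    set r := pvBfsA land (land.length : Int) ((land.headD []).length : Int) st.2.2
      (pvFuel land) [(i, j)] st.1 0 with hr
    have hconn0 : ∀ c, pvConn land (i, j) c → st.1 c = 0 := by
      intro c hconn
      by_contra h
      have hpos : 0 < st.1 c := lt_of_le_of_ne (hinv.nonneg c) (Ne.symm h)
      have := hinv.cons c (i, j) hpos (pvConn_symm land hconn)
      omega
    have hmono : ∀ c, 0 < st.1 c → 0 < r.1 c := by
      intro c hc
      have hnc : ¬ pvConn land (i, j) c := fun h => by have := hconn0 c h; omega
      rw [C2 c hnc]; exact hc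
    have hval : ∀ c, 0 < r.1 c → (pvConn land (i, j) c ∨ 0 < st.1 c) := by
      intro c hc
      by_cases h : pvConn land (i, j) c
      · exact Or.inl h
      · rw [C2 c h] at hc; exact Or.inr hc
    refine ⟨?_, ?_, ?_, ?_, ?_, ?_, ?_, ?_⟩
    · have := hinv.one_le; simp only; omega
    · intro c; by_cases h : pvConn land (i, j) c
      · rw [(C1 c).mpr h]; omega
      · rw [C2 c h]; exact hinv.nonneg c
    · intro c; by_cases h : pvConn land (i, j) c
      · rw [(C1 c).mpr h]; simp only; omega
      · rw [C2 c h]; have := hinv.lt c; simp only; omega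
    · intro c hc
      rcases hval c hc with h | h
      · exact pvConn_oil land h hs
      · exact hinv.oil c h
    · intro c d hc hcd
      by_cases h : pvConn land (i, j) c
      · have hd : pvConn land (i, j) d := Relation.ReflTransGen.trans h hcd
        rw [(C1 c).mpr h, (C1 d).mpr hd]
      · have hd : ¬ pvConn land (i, j) d := fun h' =>
          h (Relation.ReflTransGen.trans h' (pvConn_symm land hcd))
        rw [C2 c h] at hc ⊢
        rw [C2 d hd]
        exact hinv.cons c d hc hcd
    · intro c d hc hd heq
      rcases hval c hc with h1 | h1 <;> rcases hval d hd with h2 | h2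
      · exact Relation.ReflTransGen.trans (pvConn_symm land h1) h2
      · exfalso
        rw [(C1 c).mpr h1, C2 d (fun h => by have := hconn0 d h; omega)] at heq
        have := hinv.lt d; omega
      · exfalso
        rw [(C1 d).mpr h2, C2 c (fun h => by have := hconn0 c h; omega)] at heq
        have := hinv.lt c; omega
      · rw [C2 c (fun h => by have := hconn0 c h; omega),
          C2 d (fun h => by have := hconn0 d h; omega)] at heq
        exact hinv.inj c d h1 h2 heq
    · intro c hc hoil
      rcases hc with hc | hc
      · exact hmono c (hinv.cover c hc hoil)
      · subst hc
        rw [(C1 _).mpr Relation.ReflTransGen.refl]; exact hnum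
    · intro k hk0 hklt
      simp only at hklt ⊢
      by_cases hkn : k = st.2.2
      · subst hkn
        have hu : pvUpd st.2.1 st.2.2 r.2 st.2.2 = r.2 := by simp [pvUpd]
        rw [hu]
        exact C3
      · have hklt' : k < st.2.2 := by omega
        have : pvUpd st.2.1 st.2.2 r.2 k = st.2.1 k := by
          rw [pvUpd, if_neg hkn]
        rw [this, hinv.sizes k hk0 hklt']
        congr 2
        apply Finset.filter_congr
        intro c _
        constructor
        · intro h
          have hnc : ¬ pvConn land (i, j) c := fun hcn => by
            have := hconn0 c hcn; omega
          rw [C2 c hnc]; exact h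
        · intro h
          have hnc : ¬ pvConn land (i, j) c := fun hcn => by
            rw [(C1 c).mpr hcn] at h; omega
          rw [C2 c hnc] at h; exact h

theorem pvRowA_inv (land : List (List Int)) (i : Int)
    (hi : 0 ≤ i ∧ i < (land.length : Int)) :
    ∀ (js : List Int) (proc : Int × Int → Prop)
      (st : (((Int × Int) → Int) × (Int → Int) × Int)),
      (∀ j ∈ js, 0 ≤ j ∧ j < ((land.headD []).length : Int)) →
      PvScanInv land proc st.1 st.2.1 st.2.2 →
      PvScanInv land (fun c => proc c ∨ (c.1 = i ∧ c.2 ∈ js))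
        (js.foldl (pvCellStepA land (land.length : Int) ((land.headD []).length : Int) i) st).1
        (js.foldl (pvCellStepA land (land.length : Int) ((land.headD []).length : Int) i) st).2.1
        (js.foldl (pvCellStepA land (land.length : Int) ((land.headD []).length : Int) i) st).2.2
    := by
  intro js
  induction js with
  | nil =>
    intro proc st _ hinv
    exact pvScanInv_mono land (fun c hc => by
      rcases hc with hc | hc
      · exact hc
      · simp at hc) hinv
  | cons j js ih =>
    intro proc st hjs hinv
    simp only [List.foldl_cons]
    have h1 := pvStepA_inv land proc st i j
      ⟨hi.1, hi.2, (hjs j List.mem_cons_self).1, (hjs j List.mem_cons_self).2⟩ hinv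
    have h2 := ih (fun c => proc c ∨ c = (i, j)) _
      (fun j' hj' => hjs j' (List.mem_cons_of_mem _ hj')) h1
    exact pvScanInv_mono land (fun c hc => by
      rcases hc with hc | ⟨hc1, hc2⟩
      · exact Or.inl (Or.inl hc)
      · rcases List.mem_cons.mp hc2 with h | h
        · exact Or.inl (Or.inr (by rw [← hc1, ← h]))
        · exact Or.inr ⟨hc1, h⟩) h2

theorem pvScanA_inv (land : List (List Int)) :
    ∀ (is : List Int) (proc : Int × Int → Prop)
      (st : (((Int × Int) → Int) × (Int → Int) × Int)),
      (∀ i ∈ is, 0 ≤ i ∧ i < (land.length : Int)) →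
      PvScanInv land proc st.1 st.2.1 st.2.2 →
      PvScanInv land
        (fun c => proc c ∨ (c.1 ∈ is ∧ 0 ≤ c.2 ∧ c.2 < ((land.headD []).length : Int)))
        ((is.foldl (fun st i => (PySem.List.pyRange 0 ((land.headD []).length : Int) 1).foldl
          (pvCellStepA land (land.length : Int) ((land.headD []).length : Int) i) st) st)).1
        ((is.foldl (fun st i => (PySem.List.pyRange 0 ((land.headD []).length : Int) 1).foldl
          (pvCellStepA land (land.length : Int) ((land.headD []).length : Int) i) st) st)).2.1
        ((is.foldl (fun st i => (PySem.List.pyRange 0 ((land.headD []).length : Int) 1).foldl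
          (pvCellStepA land (land.length : Int) ((land.headD []).length : Int) i) st) st)).2.2
    := by
  intro is
  induction is with
  | nil =>
    intro proc st _ hinv
    exact pvScanInv_mono land (fun c hc => by
      rcases hc with hc | hc
      · exact hc
      · simp at hc) hinv
  | cons i is ih =>
    intro proc st his hinv
    simp only [List.foldl_cons]
    have h1 := pvRowA_inv land i (his i List.mem_cons_self)
      (PySem.List.pyRange 0 ((land.headD []).length : Int) 1) proc st
      (fun j hj => (PySem.List.mem_pyRange_one.mp hj)) hinv
    have h2 := ih (fun c => proc c ∨ (c.1 = i ∧ c.2 ∈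
        PySem.List.pyRange 0 ((land.headD []).length : Int) 1)) _
      (fun i' hi' => his i' (List.mem_cons_of_mem _ hi')) h1
    exact pvScanInv_mono land (fun c hc => by
      rcases hc with hc | ⟨hc1, hc2⟩
      · exact Or.inl (Or.inl hc)
      · rcases List.mem_cons.mp hc1 with h | h
        · exact Or.inl (Or.inr ⟨h, PySem.List.mem_pyRange_one.mpr ⟨hc2.1, hc2.2⟩⟩)
        · exact Or.inr ⟨h, hc2⟩) h2

theorem pvScanA_spec (land : List (List Int)) :
    PvScanInv land
      (fun c => 0 ≤ c.1 ∧ c.1 < (land.length : Int) ∧ 0 ≤ c.2 ∧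
        c.2 < ((land.headD []).length : Int))
      (pvScanA land (land.length : Int) ((land.headD []).length : Int)).1
      (pvScanA land (land.length : Int) ((land.headD []).length : Int)).2.1
      (pvScanA land (land.length : Int) ((land.headD []).length : Int)).2.2 := by
  have hinit : PvScanInv land (fun _ => False)
      ((fun (_ : Int × Int) => (0 : Int)), (fun (_ : Int) => (0 : Int)), (1 : Int)).1
      ((fun (_ : Int × Int) => (0 : Int)), (fun (_ : Int) => (0 : Int)), (1 : Int)).2.1
      ((fun (_ : Int × Int) => (0 : Int)), (fun (_ : Int) => (0 : Int)), (1 : Int)).2.2 := by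
    refine ⟨le_refl _, fun _ => le_refl _, fun _ => by norm_num, ?_, ?_, ?_, ?_, ?_⟩
    · intro c hc; simp at hc
    · intro c d hc; simp at hc
    · intro c d hc; simp at hc
    · intro c hc; exact absurd hc (by simp)
    · intro k h1 h2; simp only at h2; omega
  have h := pvScanA_inv land (PySem.List.pyRange 0 (land.length : Int) 1) (fun _ => False)
    ((fun (_ : Int × Int) => (0 : Int)), (fun (_ : Int) => (0 : Int)), (1 : Int))
    (fun i hi => PySem.List.mem_pyRange_one.mp hi) hinit
  rw [pvScanA]
  exact pvScanInv_mono land (fun c hc =>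
    Or.inr ⟨PySem.List.mem_pyRange_one.mpr ⟨hc.1, hc.2.1⟩, hc.2.2⟩) h

theorem pvColSetA (check : (Int × Int) → Int) (j : Int) :
    ∀ (is : List Int) (s0 : List Int),
      (s0.Nodup →
        (is.foldl (fun s i => if check (i, j) ≠ 0 then PySem.Set.add s (check (i, j)) else s)
          s0).Nodup) ∧
      (∀ k, k ∈ is.foldl (fun s i => if check (i, j) ≠ 0 then PySem.Set.add s (check (i, j))
          else s) s0 ↔ k ∈ s0 ∨ ∃ i ∈ is, check (i, j) = k ∧ k ≠ 0) := by
  intro is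
  induction is with
  | nil => intro s0; exact ⟨fun h => h, fun k => by simp⟩
  | cons i is ih =>
    intro s0
    simp only [List.foldl_cons]
    by_cases hc : check (i, j) ≠ 0
    · rw [if_pos hc]
      obtain ⟨ihn, ihm⟩ := ih (PySem.Set.add s0 (check (i, j)))
      refine ⟨fun h => ihn (PySem.Set.nodup_add _ _ h), ?_⟩
      intro k
      rw [ihm k, PySem.Set.mem_add]
      constructor
      · rintro ((h | h) | ⟨i', hi', h⟩)
        · exact Or.inl h
        · exact Or.inr ⟨i, List.mem_cons_self, h.symm, h ▸ hc⟩
        · exact Or.inr ⟨i', List.mem_cons_of_mem _ hi', h⟩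
      · rintro (h | ⟨i', hi', h1, h2⟩)
        · exact Or.inl (Or.inl h)
        · rcases List.mem_cons.mp hi' with h' | h'
          · exact Or.inl (Or.inr (by rw [← h', h1]))
          · exact Or.inr ⟨i', h', h1, h2⟩
    · rw [if_neg hc]
      obtain ⟨ihn, ihm⟩ := ih s0
      refine ⟨ihn, ?_⟩
      intro k
      rw [ihm k]
      constructor
      · rintro (h | ⟨i', hi', h⟩)
        · exact Or.inl h
        · exact Or.inr ⟨i', List.mem_cons_of_mem _ hi', h⟩
      · rintro (h | ⟨i', hi', h1, h2⟩)
        · exact Or.inl h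
        · rcases List.mem_cons.mp hi' with h' | h'
          · exact absurd (h' ▸ h1) (by intro hh; exact h2 (hh ▸ (not_not.mp hc)))
          · exact Or.inr ⟨i', h', h1, h2⟩

theorem pvSumCast (g : Int → Nat) :
    ∀ (l : List Int), (l.map (fun k => ((g k : Nat) : Int))).sum = (((l.map g).sum : Nat) : Int)
  | [] => by simp
  | k :: l => by
    simp only [List.map_cons, List.sum_cons, pvSumCast g l]
    push_cast
    ring

theorem pvColValA_spec (land : List (List Int)) (j : Int)
    (F : Finset (Int × Int)) (hF : ∀ c, c ∈ F ↔ pvReach land j c) :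
    pvColValA land (land.length : Int)
      (pvScanA land (land.length : Int) ((land.headD []).length : Int)) j = (F.card : Int) := by
  have inv := pvScanA_spec land
  set st := pvScanA land (land.length : Int) ((land.headD []).length : Int) with hst
  rw [pvColValA]
  obtain ⟨hnodup, hmem⟩ := pvColSetA st.1 j (PySem.List.pyRange 0 (land.length : Int) 1) []
  set labels := (PySem.List.pyRange 0 (land.length : Int) 1).foldl
    (fun s i => if st.1 (i, j) ≠ 0 then PySem.Set.add s (st.1 (i, j)) else s) [] with hlabels
  have hnd : labels.Nodup := hnodup List.nodup_nil
  have hmem' : ∀ k, k ∈ labels ↔ ∃ i, 0 ≤ i ∧ i < (land.length : Int) ∧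
      st.1 (i, j) = k ∧ k ≠ 0 := by
    intro k
    rw [hmem k]
    simp only [List.not_mem_nil, false_or]
    constructor
    · rintro ⟨i, hi, h1, h2⟩
      obtain ⟨hi1, hi2⟩ := PySem.List.mem_pyRange_one.mp hi
      exact ⟨i, hi1, hi2, h1, h2⟩
    · rintro ⟨i, hi1, hi2, h1, h2⟩
      exact ⟨i, PySem.List.mem_pyRange_one.mpr ⟨hi1, hi2⟩, h1, h2⟩
  have hpos : ∀ k ∈ labels, 0 < k ∧ k < st.2.2 := by
    intro k hk
    obtain ⟨i, _, _, h1, h2⟩ := (hmem' k).mp hk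
    have := inv.nonneg (i, j)
    have := inv.lt (i, j)
    constructor <;> omega
  have hmapeq : labels.map st.2.1 =
      labels.map (fun k => ((((pvGrid land).filter (fun c => st.1 c = k)).card : Nat) : Int)) := by
    apply List.map_congr_left
    intro k hk
    exact inv.sizes k (hpos k hk).1 (hpos k hk).2
  rw [hmapeq, pvSumCast]
  have hbi : labels.toFinset.biUnion (fun k => (pvGrid land).filter (fun c => st.1 c = k)) = F := by
    ext c
    simp only [Finset.mem_biUnion, List.mem_toFinset, hF]
    constructor
    · rintro ⟨k, hk, hc⟩
      obtain ⟨i, hi1, hi2, h1, h2⟩ := (hmem' k).mp hk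
      obtain ⟨hcg, hck⟩ := Finset.mem_filter.mp hc
      have hk0 : 0 < k := (hpos k hk).1
      have hconn := inv.inj (i, j) c (by omega) (by omega) (by rw [h1, hck])
      exact ⟨i, inv.oil (i, j) (by omega), hconn⟩
    · rintro ⟨i, hoil, hconn⟩
      have hb := hoil
      have hk : 0 < st.1 (i, j) := inv.cover (i, j)
        ⟨hb.1, hb.2.1, hb.2.2.1, hb.2.2.2.1⟩ hoil
      have hckc : st.1 c = st.1 (i, j) := inv.cons (i, j) c hk hconn
      refine ⟨st.1 (i, j), ?_, ?_⟩
      · exact (hmem' _).mpr ⟨i, hb.1, hb.2.1, rfl, by omega⟩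
      · exact Finset.mem_filter.mpr ⟨pvOil_mem_grid land (pvConn_oil land hconn hoil), hckc⟩
  have hdisj : ∀ x ∈ labels.toFinset, ∀ y ∈ labels.toFinset, x ≠ y →
      Disjoint ((pvGrid land).filter (fun c => st.1 c = x))
        ((pvGrid land).filter (fun c => st.1 c = y)) := by
    intro x _ y _ hxy
    rw [Finset.disjoint_left]
    intro c hc hc'
    exact hxy ((Finset.mem_filter.mp hc).2.symm.trans (Finset.mem_filter.mp hc').2)
  have hcard := Finset.card_biUnion hdisj
  rw [hbi] at hcard
  have hsum : (labels.map (fun k => ((pvGrid land).filter (fun c => st.1 c = k)).card)).sum =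
      ∑ k ∈ labels.toFinset, ((pvGrid land).filter (fun c => st.1 c = k)).card := by
    rw [List.sum_toFinset _ hnd]
  rw [hsum, ← hcard]

/-- the neighbour-scan body of B's flood fill, named for the proofs -/
def pvStepFnB (land : List (List Int)) (n m : Int)
    (s : (((Int × Int) → Bool) × List (Int × Int))) (mv : Int × Int) :
    (((Int × Int) → Bool) × List (Int × Int)) :=
  if 0 ≤ mv.1 ∧ mv.1 < n ∧ mv.2 ≥ 0 ∧ mv.2 < m ∧ pvCell land mv.1 mv.2 ≠ 0 ∧ ¬ s.1 mv = true then
    (pvUpd s.1 mv true, mv :: s.2)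
  else s

theorem pvFloodB_cons (land : List (List Int)) (n m : Int) (fuel : Nat)
    (c : Int × Int) (stack : List (Int × Int)) (seen : (Int × Int) → Bool) (count : Int) :
    pvFloodB land n m (fuel + 1) (c :: stack) seen count =
      pvFloodB land n m fuel
        ((pvNbrs c).foldl (pvStepFnB land n m) (seen, stack)).2
        ((pvNbrs c).foldl (pvStepFnB land n m) (seen, stack)).1
        (count + 1) := rfl

theorem pvFoldB (land : List (List Int)) (c : Int × Int) (hc : pvOil land c) :
    ∀ (L : List (Int × Int)) (seen : (Int × Int) → Bool) (stack : List (Int × Int)),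
      (∀ d ∈ L, d ∈ pvNbrs c) →
      ∃ fr : List (Int × Int),
        (L.foldl (pvStepFnB land (land.length : Int) ((land.headD []).length : Int))
          (seen, stack)).2 = fr ++ stack ∧
        fr.Nodup ∧
        (∀ x ∈ fr, pvAdj land c x ∧ seen x = false) ∧
        (∀ x, (L.foldl (pvStepFnB land (land.length : Int) ((land.headD []).length : Int))
          (seen, stack)).1 x = if x ∈ fr then true else seen x) ∧
        (∀ d ∈ L, pvOil land d →
          (L.foldl (pvStepFnB land (land.length : Int) ((land.headD []).length : Int))
            (seen, stack)).1 d = true) := by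
  intro L
  induction L with
  | nil =>
    intro seen stack _
    exact ⟨[], by simp, List.nodup_nil, by simp, by simp, by simp⟩
  | cons e L ih =>
    intro seen stack hL
    have hLae : ∀ d ∈ L, d ∈ pvNbrs c := fun d hd => hL d (List.mem_cons_of_mem _ hd)
    have he : e ∈ pvNbrs c := hL e List.mem_cons_self
    simp only [List.foldl_cons]
    by_cases hcond : 0 ≤ e.1 ∧ e.1 < (land.length : Int) ∧ e.2 ≥ 0 ∧
        e.2 < ((land.headD []).length : Int) ∧ pvCell land e.1 e.2 ≠ 0 ∧ ¬ seen e = true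
    · have hoil : pvOil land e := ⟨hcond.1, hcond.2.1, hcond.2.2.1, hcond.2.2.2.1,
        hcond.2.2.2.2.1⟩
      have hseen : seen e = false := by
        have := hcond.2.2.2.2.2
        simp at this
        exact this
      have hstep : pvStepFnB land (land.length : Int) ((land.headD []).length : Int)
          (seen, stack) e = (pvUpd seen e true, e :: stack) := by
        rw [pvStepFnB, if_pos hcond]
      rw [hstep]
      obtain ⟨fr, h1, h2, h3, h4, h5⟩ := ih (pvUpd seen e true) (e :: stack) hLae
      have hefr : e ∉ fr := by
        intro hmem
        have := (h3 e hmem).2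
        simp [pvUpd] at this
      refine ⟨fr ++ [e], ?_, ?_, ?_, ?_, ?_⟩
      · rw [h1]; simp
      · refine List.Nodup.append h2 (List.nodup_singleton e) ?_
        intro a ha hb
        rw [List.mem_singleton.mp hb] at ha
        exact hefr ha
      · intro x hx
        rcases List.mem_append.mp hx with hx' | hx'
        · obtain ⟨ha, hv⟩ := h3 x hx'
          refine ⟨ha, ?_⟩
          simp only [pvUpd] at hv
          by_cases hxe : x = e
          · subst hxe; exact hseen
          · rwa [if_neg hxe] at hv
        · rw [List.mem_singleton.mp hx']
          exact ⟨⟨hc, hoil, he⟩, hseen⟩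
      · intro x
        rw [h4 x]
        by_cases hxfr : x ∈ fr
        · rw [if_pos hxfr, if_pos (List.mem_append.mpr (Or.inl hxfr))]
        · rw [if_neg hxfr]
          simp only [pvUpd]
          by_cases hxe : x = e
          · subst hxe
            rw [if_pos rfl, if_pos (List.mem_append.mpr (Or.inr (List.mem_singleton.mpr rfl)))]
          · rw [if_neg hxe, if_neg (by simp [hxe, hxfr])]
      · intro d hd hdoil
        rcases List.mem_cons.mp hd with rfl | hd'
        · rw [h4 d]
          split
          · rfl
          · simp [pvUpd]
        · exact h5 d hd' hdoil
    · have hstep : pvStepFnB land (land.length : Int) ((land.headD []).length : Int)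
          (seen, stack) e = (seen, stack) := by
        rw [pvStepFnB, if_neg hcond]
      rw [hstep]
      obtain ⟨fr, h1, h2, h3, h4, h5⟩ := ih seen stack hLae
      refine ⟨fr, h1, h2, h3, h4, ?_⟩
      intro d hd hdoil
      rcases List.mem_cons.mp hd with rfl | hd'
      · have hseen : seen d = true := by
          by_contra h
          exact hcond ⟨hdoil.1, hdoil.2.1, hdoil.2.2.1, hdoil.2.2.2.1, hdoil.2.2.2.2,
            by simp [h]⟩
        rw [h4 d]
        split
        · rfl
        · exact hseen
      · exact h5 d hd' hdoil

/-- loop invariant of B's flood fill for column j -/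
structure PvFloodInv (land : List (List Int)) (j : Int)
    (stack : List (Int × Int)) (seen : (Int × Int) → Bool) (count : Int) : Prop where
  qmark : ∀ c ∈ stack, seen c = true
  marks : ∀ c, seen c = true → pvOil land c ∧ pvReach land j c
  src : ∀ c, pvOil land c → c.2 = j → seen c = true
  explored : ∀ c, seen c = true → c ∉ stack → ∀ d, pvAdj land c d → seen d = true
  nodup : stack.Nodup
  count_eq : count = (((pvGrid land).filter (fun c => seen c = true)).card : Int) - stack.length

theorem pvFloodB_core (land : List (List Int)) (j : Int) :
    ∀ (fuel : Nat) (stack : List (Int × Int)) (seen : (Int × Int) → Bool) (count : Int),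
      PvFloodInv land j stack seen count →
      stack.length + ((pvGrid land).filter (fun c => seen c = false)).card < fuel →
      ∃ F : Finset (Int × Int), (∀ c, c ∈ F ↔ pvReach land j c) ∧
        pvFloodB land (land.length : Int) ((land.headD []).length : Int) fuel stack seen count =
          (F.card : Int) := by
  intro fuel
  induction fuel with
  | zero => intro stack seen count _ hf; exact absurd hf (Nat.not_lt_zero _)
  | succ fuel ih =>
    intro stack seen count hinv hf
    match stack with
    | [] =>
      refine ⟨(pvGrid land).filter (fun c => seen c = true), ?_, ?_⟩
      · intro c
        simp only [Finset.mem_filter]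
        constructor
        · rintro ⟨_, hc⟩; exact (hinv.marks c hc).2
        · rintro ⟨i, hoil, hconn⟩
          have hseen : seen c = true := by
            clear hf
            induction hconn with
            | refl => exact hinv.src (i, j) hoil rfl
            | tail hp hadj ihh => exact hinv.explored _ ihh (List.not_mem_nil) _ hadj
          exact ⟨pvOil_mem_grid land (hinv.marks c hseen).1, hseen⟩
      · have hres : pvFloodB land (land.length : Int) ((land.headD []).length : Int)
            (fuel + 1) [] seen count = count := rfl
        rw [hres, hinv.count_eq]
        simp
    | c :: stack' =>
      have hcs : seen c = true := hinv.qmark c List.mem_cons_self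
      have hcoil : pvOil land c := (hinv.marks c hcs).1
      have hcreach : pvReach land j c := (hinv.marks c hcs).2
      rw [pvFloodB_cons]
      obtain ⟨fr, hq, hfrnd, hfr, hpt, hcov⟩ :=
        pvFoldB land c hcoil (pvNbrs c) seen stack' (fun d hd => hd)
      set F := (pvNbrs c).foldl
        (pvStepFnB land (land.length : Int) ((land.headD []).length : Int)) (seen, stack')
        with hGdef
      have hfr_oil : ∀ x ∈ fr, pvOil land x := fun x hx => ((hfr x hx).1).2.1
      have hfr_zero : ∀ x ∈ fr, seen x = false := fun x hx => (hfr x hx).2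
      have hfr_reach : ∀ x ∈ fr, pvReach land j x := by
        intro x hx
        obtain ⟨i, hio, hic⟩ := hcreach
        exact ⟨i, hio, Relation.ReflTransGen.tail hic (hfr x hx).1⟩
      have hmono : ∀ y, seen y = true → F.1 y = true := by
        intro y hy; rw [hpt y]; split
        · rfl
        · exact hy
      have hsub_grid : fr.toFinset ⊆ pvGrid land := by
        intro x hx; exact pvOil_mem_grid land (hfr_oil x (List.mem_toFinset.mp hx))
      have hA2 : (pvGrid land).filter (fun x => F.1 x = true) =
          (pvGrid land).filter (fun x => seen x = true) ∪ fr.toFinset := by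
        ext x
        simp only [Finset.mem_filter, Finset.mem_union, List.mem_toFinset]
        constructor
        · rintro ⟨hg, hx⟩
          rw [hpt x] at hx
          by_cases hxfr : x ∈ fr
          · exact Or.inr hxfr
          · rw [if_neg hxfr] at hx; exact Or.inl ⟨hg, hx⟩
        · rintro (⟨hg, hx⟩ | hx)
          · exact ⟨hg, hmono x hx⟩
          · refine ⟨hsub_grid (List.mem_toFinset.mpr hx), ?_⟩
            rw [hpt x, if_pos hx]
      have hdisjA : Disjoint ((pvGrid land).filter (fun x => seen x = true)) fr.toFinset := by
        rw [Finset.disjoint_right]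
        intro x hx hx'
        have h1 := hfr_zero x (List.mem_toFinset.mp hx)
        have h2 := (Finset.mem_filter.mp hx').2
        rw [h1] at h2; exact Bool.false_ne_true h2
      have hcardA : ((pvGrid land).filter (fun x => F.1 x = true)).card =
          ((pvGrid land).filter (fun x => seen x = true)).card + fr.length := by
        rw [hA2, Finset.card_union_of_disjoint hdisjA, List.toFinset_card_of_nodup hfrnd]
      have hZ2 : (pvGrid land).filter (fun x => F.1 x = false) =
          ((pvGrid land).filter (fun x => seen x = false)) \ fr.toFinset := by
        ext x
        simp only [Finset.mem_filter, Finset.mem_sdiff, List.mem_toFinset]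
        constructor
        · rintro ⟨hg, hx⟩
          rw [hpt x] at hx
          by_cases hxfr : x ∈ fr
          · rw [if_pos hxfr] at hx; exact absurd hx (by simp)
          · rw [if_neg hxfr] at hx; exact ⟨⟨hg, hx⟩, hxfr⟩
        · rintro ⟨⟨hg, hx⟩, hxfr⟩
          refine ⟨hg, ?_⟩
          rw [hpt x, if_neg hxfr]; exact hx
      have hsubZ : fr.toFinset ⊆ (pvGrid land).filter (fun x => seen x = false) := by
        intro x hx
        exact Finset.mem_filter.mpr ⟨hsub_grid hx, hfr_zero x (List.mem_toFinset.mp hx)⟩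
      have hcz1 : ((pvGrid land).filter (fun x => F.1 x = false)).card =
          ((pvGrid land).filter (fun x => seen x = false)).card - fr.length := by
        rw [hZ2, Finset.card_sdiff, Finset.inter_eq_left.mpr hsubZ,
          List.toFinset_card_of_nodup hfrnd]
      have hcz2 : fr.length ≤ ((pvGrid land).filter (fun x => seen x = false)).card := by
        calc fr.length = fr.toFinset.card := (List.toFinset_card_of_nodup hfrnd).symm
          _ ≤ _ := Finset.card_le_card hsubZ
      have hinv' : PvFloodInv land j (fr ++ stack') F.1 (count + 1) := by
        refine ⟨?_, ?_, ?_, ?_, ?_, ?_⟩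
        · intro x hx
          rcases List.mem_append.mp hx with hx' | hx'
          · rw [hpt x, if_pos hx']
          · exact hmono x (hinv.qmark x (List.mem_cons_of_mem _ hx'))
        · intro x hx
          rw [hpt x] at hx
          by_cases hxfr : x ∈ fr
          · exact ⟨hfr_oil x hxfr, hfr_reach x hxfr⟩
          · rw [if_neg hxfr] at hx; exact hinv.marks x hx
        · intro x hoil hxj
          exact hmono x (hinv.src x hoil hxj)
        · intro x hxs hxq d hadj
          by_cases hxc : x = c
          · subst hxc
            exact hcov d hadj.2.2 hadj.2.1
          · have hxfr : x ∉ fr := fun h => hxq (List.mem_append.mpr (Or.inl h))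
            have hxold : seen x = true := by
              rw [hpt x, if_neg hxfr] at hxs; exact hxs
            have hxq' : x ∉ c :: stack' := by
              intro h
              rcases List.mem_cons.mp h with h' | h'
              · exact hxc h'
              · exact hxq (List.mem_append.mpr (Or.inr h'))
            exact hmono d (hinv.explored x hxold hxq' d hadj)
        · refine List.Nodup.append hfrnd ((List.nodup_cons.mp hinv.nodup).2) ?_
          intro x hx1 hx2
          have h1 := hfr_zero x hx1
          have h2 := hinv.qmark x (List.mem_cons_of_mem _ hx2)
          rw [h1] at h2; exact Bool.false_ne_true h2
        · have h0 := hinv.count_eq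
          simp only [List.length_cons, List.length_append] at h0 ⊢
          rw [hcardA]
          push_cast at h0 ⊢
          omega
      have hf' : (fr ++ stack').length +
          ((pvGrid land).filter (fun x => F.1 x = false)).card < fuel := by
        simp only [List.length_cons] at hf
        simp only [List.length_append]
        omega
      obtain ⟨Fst, hFm, hFc⟩ := ih (fr ++ stack') F.1 (count + 1) hinv' hf'
      refine ⟨Fst, hFm, ?_⟩
      rw [hq]
      exact hFc

theorem pvInitB (land : List (List Int)) (j : Int) :
    ∀ (is : List Int) (seen : (Int × Int) → Bool) (stack : List (Int × Int)),
      is.Nodup → (∀ i ∈ is, seen (i, j) = false) → (∀ i ∈ is, (i, j) ∉ stack) →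
      ∃ fr : List (Int × Int),
        (is.foldl (fun (s : (((Int × Int) → Bool) × List (Int × Int))) i =>
          if pvCell land i j ≠ 0 then (pvUpd s.1 (i, j) true, (i, j) :: s.2) else s)
          (seen, stack)).2 = fr ++ stack ∧
        fr.Nodup ∧
        (∀ c ∈ fr, c.2 = j ∧ c.1 ∈ is ∧ pvCell land c.1 j ≠ 0) ∧
        (∀ x, (is.foldl (fun (s : (((Int × Int) → Bool) × List (Int × Int))) i =>
          if pvCell land i j ≠ 0 then (pvUpd s.1 (i, j) true, (i, j) :: s.2) else s)
          (seen, stack)).1 x = if x ∈ fr then true else seen x) ∧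
        (∀ i ∈ is, pvCell land i j ≠ 0 → (i, j) ∈ fr) := by
  intro is
  induction is with
  | nil =>
    intro seen stack _ _ _
    exact ⟨[], by simp, List.nodup_nil, by simp, by simp, by simp⟩
  | cons i is ih =>
    intro seen stack hnd hseen hstack
    have hni : i ∉ is := (List.nodup_cons.mp hnd).1
    simp only [List.foldl_cons]
    by_cases hc : pvCell land i j ≠ 0
    · rw [if_pos hc]
      have hseen' : ∀ i' ∈ is, pvUpd seen (i, j) true (i', j) = false := by
        intro i' hi'
        have hne : (i', j) ≠ (i, j) := by
          intro h
          have hii : i' = i := congrArg Prod.fst h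
          exact hni (hii ▸ hi')
        rw [pvUpd, if_neg hne]
        exact hseen i' (List.mem_cons_of_mem _ hi')
      have hstack' : ∀ i' ∈ is, (i', j) ∉ (i, j) :: stack := by
        intro i' hi' h
        rcases List.mem_cons.mp h with h' | h'
        · have hii : i' = i := congrArg Prod.fst h'
          exact hni (hii ▸ hi')
        · exact hstack i' (List.mem_cons_of_mem _ hi') h'
      obtain ⟨fr, h1, h2, h3, h4, h5⟩ := ih (pvUpd seen (i, j) true) ((i, j) :: stack)
        (List.nodup_cons.mp hnd).2 hseen' hstack'
      have hifr : (i, j) ∉ fr := by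
        intro h
        exact hni ((h3 _ h).2.1)
      refine ⟨fr ++ [(i, j)], ?_, ?_, ?_, ?_, ?_⟩
      · rw [h1]; simp
      · refine List.Nodup.append h2 (List.nodup_singleton _) ?_
        intro a ha hb
        rw [List.mem_singleton.mp hb] at ha
        exact hifr ha
      · intro c hcm
        rcases List.mem_append.mp hcm with h' | h'
        · obtain ⟨ha, hb, hcc⟩ := h3 c h'
          exact ⟨ha, List.mem_cons_of_mem _ hb, hcc⟩
        · rw [List.mem_singleton.mp h']
          exact ⟨rfl, List.mem_cons_self, hc⟩
      · intro x
        rw [h4 x]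
        by_cases hxfr : x ∈ fr
        · rw [if_pos hxfr, if_pos (List.mem_append.mpr (Or.inl hxfr))]
        · rw [if_neg hxfr]
          simp only [pvUpd]
          by_cases hxe : x = (i, j)
          · subst hxe
            rw [if_pos rfl, if_pos (List.mem_append.mpr (Or.inr (List.mem_singleton.mpr rfl)))]
          · rw [if_neg hxe, if_neg (by simp [hxe, hxfr])]
      · intro i' hi' hc'
        rcases List.mem_cons.mp hi' with rfl | h'
        · exact List.mem_append.mpr (Or.inr (List.mem_singleton.mpr rfl))
        · exact List.mem_append.mpr (Or.inl (h5 i' h' hc'))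
    · rw [if_neg hc]
      obtain ⟨fr, h1, h2, h3, h4, h5⟩ := ih seen stack (List.nodup_cons.mp hnd).2
        (fun i' hi' => hseen i' (List.mem_cons_of_mem _ hi'))
        (fun i' hi' => hstack i' (List.mem_cons_of_mem _ hi'))
      refine ⟨fr, h1, h2, ?_, h4, ?_⟩
      · intro c hcm
        obtain ⟨ha, hb, hcc⟩ := h3 c hcm
        exact ⟨ha, List.mem_cons_of_mem _ hb, hcc⟩
      · intro i' hi' hc'
        rcases List.mem_cons.mp hi' with rfl | h'
        · exact absurd hc' hc
        · exact h5 i' h' hc'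

theorem pvColValB_spec (land : List (List Int)) (j : Int)
    (hj : 0 ≤ j ∧ j < ((land.headD []).length : Int)) :
    ∃ F : Finset (Int × Int), (∀ c, c ∈ F ↔ pvReach land j c) ∧
      pvColValB land (land.length : Int) ((land.headD []).length : Int) j = (F.card : Int) := by
  rw [pvColValB]
  have hnd : (PySem.List.pyRange 0 (land.length : Int) 1).Nodup := by
    rw [PySem.List.pyRange_zero_natCast]
    exact List.nodup_range.map (fun a b h => by exact_mod_cast h)
  obtain ⟨fr, h1, h2, h3, h4, h5⟩ := pvInitB land j (PySem.List.pyRange 0 (land.length : Int) 1)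
    (fun _ => false) [] hnd (fun _ _ => rfl) (fun _ _ => List.not_mem_nil)
  rw [List.append_nil] at h1
  set I := (PySem.List.pyRange 0 (land.length : Int) 1).foldl
    (fun (s : (((Int × Int) → Bool) × List (Int × Int))) i =>
      if pvCell land i j ≠ 0 then (pvUpd s.1 (i, j) true, (i, j) :: s.2) else s)
    ((fun (_ : Int × Int) => false), ([] : List (Int × Int))) with hI
  have hfr_oil : ∀ c ∈ fr, pvOil land c := by
    intro c hcm
    obtain ⟨ha, hb, hcc⟩ := h3 c hcm
    obtain ⟨hb1, hb2⟩ := PySem.List.mem_pyRange_one.mp hb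
    exact ⟨hb1, hb2, ha ▸ hj.1, ha ▸ hj.2, by rw [ha]; exact hcc⟩
  have hseenfr : ∀ x, I.1 x = true ↔ x ∈ fr := by
    intro x
    rw [h4 x]
    split
    · rename_i h; simp [h]
    · rename_i h; simp [h]
  have hinv : PvFloodInv land j fr I.1 0 := by
    refine ⟨?_, ?_, ?_, ?_, h2, ?_⟩
    · intro x hx; exact (hseenfr x).mpr hx
    · intro x hx
      have hxm := (hseenfr x).mp hx
      refine ⟨hfr_oil x hxm, ⟨x.1, ?_, ?_⟩⟩
      · have := (h3 x hxm).1
        have hx2 : x = (x.1, j) := by rw [← this]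
        rw [← hx2]; exact hfr_oil x hxm
      · have := (h3 x hxm).1
        have hx2 : x = (x.1, j) := by rw [← this]
        rw [← hx2]
        exact Relation.ReflTransGen.refl
    · intro c hoil hcj
      have hc2 : c = (c.1, j) := by rw [← hcj]
      rw [hc2]
      refine (hseenfr _).mpr (h5 c.1 ?_ ?_)
      · exact PySem.List.mem_pyRange_one.mpr ⟨hoil.1, hoil.2.1⟩
      · have := hoil.2.2.2.2; rw [hc2] at this; exact this
    · intro c hc hcs d _
      exact absurd ((hseenfr c).mp hc) hcs
    · have : (pvGrid land).filter (fun c => I.1 c = true) = fr.toFinset := by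
        ext x
        simp only [Finset.mem_filter, List.mem_toFinset, hseenfr x]
        constructor
        · rintro ⟨_, h⟩; exact h
        · intro h; exact ⟨pvOil_mem_grid land (hfr_oil x h), h⟩
      rw [this, List.toFinset_card_of_nodup h2]
      simp
  have hfuel : fr.length + ((pvGrid land).filter (fun c => I.1 c = false)).card <
      pvFuel land := by
    have hZ : (pvGrid land).filter (fun c => I.1 c = false) = pvGrid land \ fr.toFinset := by
      ext x
      simp only [Finset.mem_filter, Finset.mem_sdiff, List.mem_toFinset]
      constructor
      · rintro ⟨hg, hx⟩
        refine ⟨hg, fun h => ?_⟩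
        rw [(hseenfr x).mpr h] at hx
        simp at hx
      · rintro ⟨hg, hx⟩
        refine ⟨hg, ?_⟩
        by_cases h : I.1 x = true
        · exact absurd ((hseenfr x).mp h) hx
        · simpa using h
    have hsubfr : fr.toFinset ⊆ pvGrid land :=
      fun x hx => pvOil_mem_grid land (hfr_oil x (List.mem_toFinset.mp hx))
    have hZc : ((pvGrid land).filter (fun c => I.1 c = false)).card =
        (pvGrid land).card - fr.length := by
      rw [hZ, Finset.card_sdiff, Finset.inter_eq_left.mpr hsubfr,
        List.toFinset_card_of_nodup h2]
    have hfrle : fr.length ≤ (pvGrid land).card := by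
      calc fr.length = fr.toFinset.card := (List.toFinset_card_of_nodup h2).symm
        _ ≤ _ := Finset.card_le_card hsubfr
    rw [hZc]
    have : pvFuel land = (pvGrid land).card + 1 := by rw [pvFuel, pvGrid_card]
    omega
  obtain ⟨F, hFm, hFc⟩ := pvFloodB_core land j (pvFuel land) fr I.1 0 hinv hfuel
  exact ⟨F, hFm, by rw [h1]; exact hFc⟩

theorem pv_main (land : List (List Int)) : solution land = solution_alt land := by
  simp only [solution, solution_alt]
  apply PySem.List.foldl_congr_mem
  intro acc x hx
  obtain ⟨hx1, hx2⟩ := PySem.List.mem_pyRange_one.mp hx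
  obtain ⟨F, hFm, hFc⟩ := pvColValB_spec land x ⟨hx1, hx2⟩
  rw [pvColValA_spec land x F hFm, hFc]
-- ===== VERDICT (by name: the statement is the Claim_ definition above) =====
theorem solution_spec : Claim_equal_solution := by
  intro land _ _
  unfold Spec_solution
  exact pv_main land
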